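-- pv_equiv track=rewrite | github.com/Farazulhaque/PythonCoding | Q118/grades.py | countGrades
-- ===== SOURCE A (Python) =====
-- def countGrades(gradeBook):
--     grades = ['A', 'B', 'C', 'D', 'F']
--     g = []
--     count = []
--     for grade in gradeBook:
--         g.append(gradeBook[grade])
--     for i in grades:
--         count.append(g.count(i))
--
--     return count
-- ===== SOURCE B (Python) =====
-- def countGrades(gradeBook):
--     # Sort the values once; each grade's occurrences then form a contiguous run,
--     # located by two binary searches whose difference is the run's length.
--     vals = sorted(gradeBook.values())
--
--     def first_index(go_right):
--         # go_right is true on a prefix of the sorted list vals;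
--         # return the first index where it is false (= len(vals) if never false).
--         lo, hi = 0, len(vals)
--         while lo < hi:
--             mid = (lo + hi) // 2
--             if go_right(vals[mid]):
--                 lo = mid + 1
--             else:
--                 hi = mid
--         return lo
--
--     counts = []
--     for g in ['A', 'B', 'C', 'D', 'F']:
--         counts.append(first_index(lambda v: v <= g) - first_index(lambda v: v < g))
--     return counts
-- ===== Notes on version B (the rewrite author's own statement) =====
-- stated objective: alternative
-- what changed: Replaces A's five full linear .count scans over a rebuilt value list with sort-then-binary-search: the values are sorted once and each grade's count is the length of its contiguous run, obtained as the difference of two binary searches.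
import Mathlib
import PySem

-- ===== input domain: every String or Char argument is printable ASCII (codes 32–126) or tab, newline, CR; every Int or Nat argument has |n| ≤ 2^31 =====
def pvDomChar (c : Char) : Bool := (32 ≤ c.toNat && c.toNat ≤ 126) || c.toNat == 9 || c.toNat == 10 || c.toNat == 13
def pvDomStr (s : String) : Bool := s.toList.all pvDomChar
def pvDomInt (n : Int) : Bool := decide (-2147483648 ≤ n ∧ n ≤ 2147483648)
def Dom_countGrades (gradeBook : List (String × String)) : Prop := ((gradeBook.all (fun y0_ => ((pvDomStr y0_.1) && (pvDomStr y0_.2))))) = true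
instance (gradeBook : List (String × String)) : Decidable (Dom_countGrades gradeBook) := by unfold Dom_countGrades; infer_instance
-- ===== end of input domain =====

-- B replaces A's five full .count scans over a rebuilt value list by sorting the
-- values once and binary-searching each grade's contiguous run (objective: alternative).

-- ===== PORT A =====
-- The dict argument arrives as an association list; the Python dict it denotes is
-- Dict.ofList (last duplicate wins, insertion order).  'gradeBook[grade]' with grade
-- iterated from the dict's own keys always succeeds, so getD with a dummy default is exact.
def countGrades (gradeBook : List (String × String)) : List Int :=
  let d := PySem.Dict.ofList gradeBook
  let grades : List String := ["A", "B", "C", "D", "F"]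
  let g : List String := (PySem.Dict.keys d).foldl (fun acc grade => acc ++ [PySem.Dict.getD d grade ""]) []
  grades.foldl (fun acc i => acc ++ [(g.count i : Int)]) []

-- ===== PORT B =====
-- Source B's while-loop binary search, as recursion on the shrinking interval.
-- 'vals[mid]' is always in range (lo ≤ mid < hi ≤ len vals), so getD with a dummy
-- default is exact; '(lo+hi)//2' on nonnegative ints is Nat division, exact.
def firstIndex (vals : List String) (goRight : String → Bool) (lo hi : Nat) : Nat :=
  if h : lo < hi then
    let mid := (lo + hi) / 2
    if goRight (vals.getD mid "") then firstIndex vals goRight (mid + 1) hi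
    else firstIndex vals goRight lo mid
  else lo
termination_by hi - lo
decreasing_by all_goals omega

def countGrades_alt (gradeBook : List (String × String)) : List Int :=
  let vals := PySem.List.sorted (PySem.Dict.values (PySem.Dict.ofList gradeBook)) (fun v => v) false
  (["A", "B", "C", "D", "F"] : List String).foldl
    (fun counts g =>
      counts ++ [((firstIndex vals (fun v => decide (v ≤ g)) 0 vals.length : Int)
                  - (firstIndex vals (fun v => decide (v < g)) 0 vals.length : Int))]) []

-- ===== PRECONDITION & SPEC =====
def Spec_countGrades (gradeBook : List (String × String)) (out : List Int) : Prop := out = countGrades_alt gradeBook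
instance (gradeBook : List (String × String)) (out : List Int) : Decidable (Spec_countGrades gradeBook out) := by unfold Spec_countGrades; infer_instance

-- ===== CLAIM (what is proved, stated in full; the proofs are below) =====
def Claim_equal_countGrades : Prop := ∀ (gradeBook : List (String × String)), Dom_countGrades gradeBook → Spec_countGrades gradeBook (countGrades gradeBook)

-- ===== LEMMAS AND PROOFS =====

-- The binary search returns k whenever goRight is exactly 'index < k' and lo ≤ k ≤ hi.
theorem firstIndex_eq (vals : List String) (p : String → Bool) (k : Nat)
    (hp : ∀ i, i < vals.length → p (vals.getD i "") = decide (i < k)) :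
    ∀ n lo hi, hi - lo ≤ n → lo ≤ k → k ≤ hi → hi ≤ vals.length →
      firstIndex vals p lo hi = k := by
  intro n
  induction n with
  | zero =>
    intro lo hi h h1 h2 h3
    rw [firstIndex]
    have : ¬ lo < hi := by omega
    simp only [this, dif_neg, not_false_iff]
    omega
  | succ n ih =>
    intro lo hi h h1 h2 h3
    rw [firstIndex]
    by_cases hlt : lo < hi
    · simp only [hlt, dif_pos]
      have hm : (lo + hi) / 2 < vals.length := by omega
      have hpv := hp ((lo + hi) / 2) hm
      by_cases hc : (lo + hi) / 2 < k
      · rw [hpv]; simp only [hc, decide_true, if_true]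
        exact ih ((lo + hi) / 2 + 1) hi (by omega) (by omega) h2 h3
      · rw [hpv]; simp only [hc, decide_false, Bool.false_eq_true, if_false]
        exact ih lo ((lo + hi) / 2) (by omega) h1 (by omega) (by omega)
    · simp only [hlt, dif_neg, not_false_iff]
      omega

-- In a sorted list, a downward-closed predicate holds exactly on the prefix of
-- length countP.
theorem prefix_count (p : String → Bool)
    (hmono : ∀ a b : String, a ≤ b → p b = true → p a = true) :
    ∀ l : List String, l.Pairwise (· ≤ ·) →
      ∀ i, i < l.length → p (l.getD i "") = decide (i < l.countP p) := by
  intro l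
  induction l with
  | nil => intro _ i hi; simp at hi
  | cons a t ih =>
    intro hs i hi
    have hle : ∀ b ∈ t, a ≤ b := fun b hb => (List.pairwise_cons.mp hs).1 b hb
    have ht : t.Pairwise (· ≤ ·) := (List.pairwise_cons.mp hs).2
    by_cases ha : p a = true
    · cases i with
      | zero => simp [ha]
      | succ i =>
        have hi' : i < t.length := by simpa using hi
        have := ih ht i hi'
        simp only [List.getD_cons_succ, List.countP_cons, ha, if_pos]
        rw [this]
        simp only [decide_eq_decide]
        omega
    · have htf : ∀ b ∈ t, p b = false := by
        intro b hb
        by_contra hb'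
        exact ha (hmono a b (hle b hb) (by simpa using hb'))
      have hcz : (a :: t).countP p = 0 := by
        rw [List.countP_eq_zero]
        intro b hb
        rcases List.mem_cons.mp hb with rfl | hb
        · simpa using ha
        · simp [htf b hb]
      rw [hcz]
      cases i with
      | zero => simpa using ha
      | succ i =>
        have hi' : i < t.length := by simpa using hi
        rw [List.getD_cons_succ, List.getD_eq_getElem t "" hi']
        simpa using htf _ (List.getElem_mem hi')

-- countP (≤ g) splits into countP (< g) plus the number of copies of g.
theorem countP_le_split (g : String) :
    ∀ l : List String,
      l.countP (fun v => decide (v ≤ g)) = l.countP (fun v => decide (v < g)) + l.count g := by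
  intro l
  induction l with
  | nil => simp
  | cons a t ih =>
    simp only [List.countP_cons, List.count_cons, ih, decide_eq_true_eq, beq_iff_eq]
    by_cases h1 : a < g
    · rw [if_pos (le_of_lt h1), if_pos h1, if_neg (ne_of_lt h1)]
      omega
    · by_cases h2 : a = g
      · subst h2
        rw [if_pos (le_refl a), if_neg h1, if_pos rfl]
        omega
      · have h3 : ¬ a ≤ g := fun hle => h1 (lt_of_le_of_ne hle h2)
        rw [if_neg h3, if_neg h1, if_neg h2]
        omega

-- One grade's binary-search difference is its count among the (unsorted) values.
theorem run_length_eq_count (values : List String) (g : String) :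
    (((firstIndex (PySem.List.sorted values (fun v => v) false) (fun v => decide (v ≤ g)) 0
        (PySem.List.sorted values (fun v => v) false).length : Nat) : Int)
      - ((firstIndex (PySem.List.sorted values (fun v => v) false) (fun v => decide (v < g)) 0
        (PySem.List.sorted values (fun v => v) false).length : Nat) : Int))
      = (values.count g : Int) := by
  set vals := PySem.List.sorted values (fun v => v) false with hv
  have hsort : vals.Pairwise (· ≤ ·) := by
    have := PySem.List.sorted_pairwise values (fun v => v)
    simpa [hv] using this
  have hperm : vals.Perm values := PySem.List.sorted_perm values (fun v => v) false
  have hle : firstIndex vals (fun v => decide (v ≤ g)) 0 vals.length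
      = vals.countP (fun v => decide (v ≤ g)) := by
    refine firstIndex_eq vals _ _ (prefix_count _ ?_ vals hsort) vals.length 0 vals.length
      (by omega) (by omega) (List.countP_le_length) (le_refl _)
    intro a b hab hb
    simp only [decide_eq_true_eq] at hb ⊢
    exact le_trans hab hb
  have hlt : firstIndex vals (fun v => decide (v < g)) 0 vals.length
      = vals.countP (fun v => decide (v < g)) := by
    refine firstIndex_eq vals _ _ (prefix_count _ ?_ vals hsort) vals.length 0 vals.length
      (by omega) (by omega) (List.countP_le_length) (le_refl _)
    intro a b hab hb
    simp only [decide_eq_true_eq] at hb ⊢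
    exact lt_of_le_of_lt hab hb
  rw [hle, hlt, countP_le_split g vals, hperm.count_eq]
  push_cast
  ring

theorem countGrades_eq (gradeBook : List (String × String)) :
    countGrades gradeBook = countGrades_alt gradeBook := by
  unfold countGrades countGrades_alt
  simp only [PySem.List.foldl_append_singleton_eq_map]
  rw [← PySem.Dict.values_eq_map_keys (PySem.Dict.ofList gradeBook)
        (PySem.Dict.nodup_keys_ofList gradeBook) ""]
  simp only [List.nil_append]
  refine List.map_congr_left ?_
  intro g _
  exact (run_length_eq_count (PySem.Dict.values (PySem.Dict.ofList gradeBook)) g).symm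

-- ===== VERDICT (by name: the statement is the Claim_ definition above) =====
theorem countGrades_spec : Claim_equal_countGrades := by
  intro gb _
  unfold Spec_countGrades
  exact countGrades_eq gb
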